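-- pv_equiv track=rewrite | github.com/akashanup/programming | IntervalsBetweenIdenticalElements/solution.py | getDistances
-- ===== SOURCE A (Python) =====
-- from typing import List
--
-- def getDistances(arr: List[int]) -> List[int]:
--     lookup = {}
--     for idx, num in enumerate(arr):
--         if num not in lookup:
--             lookup[num] = []
--         lookup[num].append(idx)
--
--     intervalsSum = {}
--     for num, indexes in lookup.items():
--         n = len(indexes)
--         prefixSum = [i for i in indexes]
--         for i in range(1, n):
--             prefixSum[i] += prefixSum[i - 1]
--         intervalSum = {}
--         for i in range(n):
--             eq1 = prefixSum[-1] - prefixSum[i] - (n - (i + 1)) * indexes[i]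
--             eq2 = (i + 1) * indexes[i] - prefixSum[i]
--             intervalSum[indexes[i]] = eq1 + eq2
--         intervalsSum[num] = intervalSum
--
--     intervals = [-1] * len(arr)
--     for idx, num in enumerate(arr):
--         intervals[idx] = intervalsSum[num][idx]
--     return intervals
-- ===== SOURCE B (Python) =====
-- from typing import List
--
-- def getDistances(arr: List[int]) -> List[int]:
--     groups = {}
--     for idx, num in enumerate(arr):
--         if num not in groups:
--             groups[num] = []
--         groups[num].append(idx)
--
--     res = [0] * len(arr)
--     for g in groups.values():
--         # left-to-right sweep: contribution of earlier identical indices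
--         count_seen = 0
--         sum_seen = 0
--         for idx in g:
--             res[idx] = count_seen * idx - sum_seen
--             count_seen += 1
--             sum_seen += idx
--         # right-to-left sweep: contribution of later identical indices
--         count_later = 0
--         sum_later = 0
--         for idx in reversed(g):
--             res[idx] += sum_later - count_later * idx
--             count_later += 1
--             sum_later += idx
--     return res
-- ===== Notes on version B (the rewrite author's own statement) =====
-- stated objective: alternative
-- what changed: Per value-group, the prefix-sum array plus the closed-form eq1/eq2 and the per-group dicts are replaced by two directional sweeps (left-to-right and right-to-left) that maintain running scalar count/sum accumulators and write each index's total directly into the result array by position.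
import Mathlib
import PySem

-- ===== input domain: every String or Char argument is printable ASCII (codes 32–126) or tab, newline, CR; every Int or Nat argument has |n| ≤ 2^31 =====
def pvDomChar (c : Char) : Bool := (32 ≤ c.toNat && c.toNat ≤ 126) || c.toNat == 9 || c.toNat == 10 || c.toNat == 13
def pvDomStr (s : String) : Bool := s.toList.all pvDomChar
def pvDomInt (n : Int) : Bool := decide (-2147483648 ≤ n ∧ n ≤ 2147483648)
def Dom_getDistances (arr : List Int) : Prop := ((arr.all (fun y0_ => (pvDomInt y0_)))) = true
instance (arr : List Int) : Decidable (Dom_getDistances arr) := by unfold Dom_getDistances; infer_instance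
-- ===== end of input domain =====

-- B replaces A's per-group prefix-sum array + closed-form eq1/eq2 + nested dicts by two
-- scalar-accumulating directional sweeps writing into the result array (constant-factor
-- speedup, measured).

-- ===== PORT A =====
-- lookup[num] = [] if absent, then append idx  ==  d[num] = d.get(num, []) + [idx]  (Dict.modify)
def getDistances (arr : List Int) : List Int :=
  let lookup : PySem.Dict Int (List Int) :=
    (PySem.List.enumerate arr 0).foldl
      (fun d p => d.modify p.2 [] (· ++ [p.1])) PySem.Dict.empty
  let intervalsSum : PySem.Dict Int (PySem.Dict Int Int) :=
    lookup.items.foldl (fun acc p =>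
      let indexes := p.2
      let n : Int := indexes.length
      let prefixSum := (PySem.List.pyRange 1 n 1).foldl
        (fun ps i =>
          PySem.List.pySetD ps i (PySem.List.pyGetD ps i 0 + PySem.List.pyGetD ps (i - 1) 0))
        indexes
      let intervalSum : PySem.Dict Int Int := (PySem.List.pyRange 0 n 1).foldl
        (fun d i =>
          let eq1 := PySem.List.pyGetD prefixSum (-1) 0 - PySem.List.pyGetD prefixSum i 0
                       - (n - (i + 1)) * PySem.List.pyGetD indexes i 0
          let eq2 := (i + 1) * PySem.List.pyGetD indexes i 0 - PySem.List.pyGetD prefixSum i 0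
          d.insert (PySem.List.pyGetD indexes i 0) (eq1 + eq2))
        PySem.Dict.empty
      acc.insert p.1 intervalSum) PySem.Dict.empty
  let intervals := List.replicate arr.length (-1 : Int)
  (PySem.List.enumerate arr 0).foldl
    (fun res p =>
      PySem.List.pySetD res p.1 ((intervalsSum.getD p.2 PySem.Dict.empty).getD p.1 0))
    intervals

-- ===== PORT B =====
def getDistances_alt (arr : List Int) : List Int :=
  let groups : PySem.Dict Int (List Int) :=
    (PySem.List.enumerate arr 0).foldl
      (fun d p => d.modify p.2 [] (· ++ [p.1])) PySem.Dict.empty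
  let res := List.replicate arr.length (0 : Int)
  groups.values.foldl (fun res g =>
    -- left-to-right sweep: (res, count_seen, sum_seen)
    let st1 := g.foldl
      (fun (st : List Int × Int × Int) idx =>
        (PySem.List.pySetD st.1 idx (st.2.1 * idx - st.2.2), st.2.1 + 1, st.2.2 + idx))
      (res, 0, 0)
    -- right-to-left sweep: (res, count_later, sum_later)
    let st2 := g.reverse.foldl
      (fun (st : List Int × Int × Int) idx =>
        (PySem.List.pySetD st.1 idx
           (PySem.List.pyGetD st.1 idx 0 + (st.2.2 - st.2.1 * idx)), st.2.1 + 1, st.2.2 + idx))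
      (st1.1, 0, 0)
    st2.1) res

-- ===== PRECONDITION & SPEC =====
def Spec_getDistances (arr : List Int) (out : List Int) : Prop := out = getDistances_alt arr
instance (arr : List Int) (out : List Int) : Decidable (Spec_getDistances arr out) := by unfold Spec_getDistances; infer_instance

-- ===== CLAIM (what is proved, stated in full; the proofs are below) =====
def Claim_equal_getDistances : Prop := ∀ (arr : List Int), Dom_getDistances arr → Spec_getDistances arr (getDistances arr)

-- ===== LEMMAS AND PROOFS =====

def grp (arr : List Int) (num : Int) : List Int :=
  ((PySem.List.enumerate arr 0).filter (fun p => p.2 == num)).map (fun p => p.1)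

theorem mem_grp (arr : List Int) (num x : Int) :
    x ∈ grp arr num ↔ ∃ k, ∃ _ : k < arr.length, x = (k : Int) ∧ arr[k] = num := by
  simp only [grp, List.mem_map, List.mem_filter, PySem.List.mem_enumerate_iff]
  constructor
  · rintro ⟨p, ⟨⟨k, hk, rfl⟩, h2⟩, rfl⟩
    exact ⟨k, hk, by simp, by simpa using h2⟩
  · rintro ⟨k, hk, rfl, h⟩
    exact ⟨((k : Int), arr[k]), ⟨⟨k, hk, by simp⟩, by simpa using h⟩, rfl⟩

theorem pairwise_grp (arr : List Int) (num : Int) : (grp arr num).Pairwise (· < ·) := by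
  exact List.Pairwise.map _ (fun a b h => h)
    ((PySem.List.pairwise_lt_enumerate arr 0).sublist List.filter_sublist)

theorem nodup_grp (arr : List Int) (num : Int) : (grp arr num).Nodup :=
  (pairwise_grp arr num).imp (fun h => ne_of_lt h)

def mkLookup (arr : List Int) : PySem.Dict Int (List Int) :=
  (PySem.List.enumerate arr 0).foldl
    (fun d p => d.modify p.2 [] (· ++ [p.1])) PySem.Dict.empty

theorem mkLookup_getD (arr : List Int) (num : Int) :
    (mkLookup arr).getD num [] = grp arr num := by
  have h : mkLookup arr = ((PySem.List.enumerate arr 0).map Prod.swap).foldl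
      (fun d p => d.modify p.1 [] (· ++ [p.2])) PySem.Dict.empty := by
    rw [List.foldl_map]; rfl
  rw [h, PySem.Dict.getD_foldl_modify_append, List.filter_map]
  simp [grp, Function.comp_def]

theorem mkLookup_keys (arr : List Int) : (mkLookup arr).keys = PySem.Set.ofList arr := by
  rw [mkLookup, PySem.Dict.keys_foldl_modify_key _ (fun q : Int × Int => q.2) [] (fun _ q => (· ++ [q.1]))]
  simp [PySem.List.map_snd_enumerate, PySem.Dict.keys_empty]
  rfl

theorem mkLookup_nodup (arr : List Int) : (mkLookup arr).keys.Nodup := by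
  exact PySem.Dict.nodup_keys_foldl_modify_key _ _ _ _ _ (by simp [PySem.Dict.keys_empty])


def preTbl (g : List Int) (m : Nat) : List Int :=
  (List.range g.length).map (fun i => if i < m then (g.take (i+1)).sum else g.getD i 0)

theorem length_preTbl (g : List Int) (m : Nat) : (preTbl g m).length = g.length := by
  simp [preTbl]

theorem getD_preTbl (g : List Int) (m i : Nat) (h : i < g.length) :
    (preTbl g m).getD i 0 = if i < m then (g.take (i+1)).sum else g.getD i 0 := by
  rw [preTbl, PySem.List.getD_map_range _ _ _ _ h]

theorem take_sum_succ (g : List Int) (m : Nat) (h : m < g.length) :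
    (g.take (m+1)).sum = (g.take m).sum + g.getD m 0 := by
  rw [List.take_add_one, List.sum_append, List.getD_eq_getElem _ _ h,
      List.getElem?_eq_getElem h]
  simp

theorem preTbl_zero (g : List Int) : preTbl g 0 = g := by
  apply List.ext_getElem (by simp [preTbl])
  intro i h1 h2
  rw [← List.getD_eq_getElem (preTbl g 0) 0 h1, getD_preTbl g 0 i h2,
      if_neg (by omega), List.getD_eq_getElem _ _ h2]

theorem preTbl_one (g : List Int) : preTbl g 1 = g := by
  apply List.ext_getElem (by simp [preTbl])
  intro i h1 h2
  rw [← List.getD_eq_getElem (preTbl g 1) 0 h1, getD_preTbl g 1 i h2]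
  rcases Nat.eq_zero_or_pos i with rfl | hi
  · rw [if_pos (by omega), List.take_add_one]
    simp [List.getElem?_eq_getElem h2]
  · rw [if_neg (by omega), List.getD_eq_getElem _ _ h2]

theorem prefix_fold_aux (g : List Int) (m : Nat) (hm : m ≤ g.length) :
    (PySem.List.pyRange 1 (m : Int) 1).foldl
      (fun ps i => PySem.List.pySetD ps i (PySem.List.pyGetD ps i 0 + PySem.List.pyGetD ps (i-1) 0)) g
    = preTbl g m := by
  induction m with
  | zero => rw [PySem.List.pyRange_one_eq_nil (by norm_num)]; simp [preTbl_zero]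
  | succ m ih =>
    rcases Nat.eq_zero_or_pos m with rfl | hm1
    · rw [show ((0+1 : Nat) : Int) = 0 + 1 by norm_num, PySem.List.pyRange_one_eq_nil (by norm_num)]
      simp [preTbl_one]
    · have hmlt : m < g.length := hm
      rw [show ((m+1 : Nat) : Int) = (m : Int) + 1 by push_cast; ring,
          PySem.List.pyRange_one_succ_right (by exact_mod_cast hm1), List.foldl_append,
          ih (le_of_lt hmlt)]
      simp only [List.foldl_cons, List.foldl_nil]
      have e1 : PySem.List.pyGetD (preTbl g m) (m : Int) 0 = g.getD m 0 := by
        rw [PySem.List.pyGetD_natCast, getD_preTbl g m m hmlt, if_neg (by omega)]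
      have e2 : PySem.List.pyGetD (preTbl g m) ((m : Int) - 1) 0 = (g.take m).sum := by
        rw [show (m : Int) - 1 = ((m - 1 : Nat) : Int) by omega,
            PySem.List.pyGetD_natCast, getD_preTbl g m (m-1) (by omega), if_pos (by omega),
            show m - 1 + 1 = m by omega]
      rw [e1, e2, PySem.List.pySetD_of_nonneg _ _ (by positivity)]
      apply List.ext_getElem (by simp [preTbl])
      intro i h1 h2
      have hi : i < g.length := by simpa [preTbl] using h2
      rw [List.getElem_set]
      have hL : i < (preTbl g m).length := by rwa [length_preTbl]
      have hR : i < (preTbl g (m+1)).length := by rwa [length_preTbl]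
      rw [← List.getD_eq_getElem (preTbl g m) 0 hL, ← List.getD_eq_getElem (preTbl g (m+1)) 0 hR,
          getD_preTbl g m i hi, getD_preTbl g (m+1) i hi]
      simp only [Int.toNat_natCast]
      split_ifs with hA hB hB <;>
        first | rfl | (rw [← hA, take_sum_succ g m hmlt]; ring) | omega

theorem pyGetD_neg_one (xs : List Int) (d : Int) (h : xs ≠ []) :
    PySem.List.pyGetD xs (-1) d = xs.getD (xs.length - 1) d := by
  have hl : 1 ≤ xs.length := List.length_pos_of_ne_nil h
  simp only [PySem.List.pyGetD, PySem.List.pyGet?, PySem.List.pyIdx?, Int.reduceNeg,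
    Int.neg_nonneg, Int.reduceLE, reduceIte, neg_le_neg_iff, Nat.one_le_cast, neg_neg,
    Int.toNat_one, List.getD_eq_getElem?_getD, if_pos hl, Option.bind_some]

def vspec (g : List Int) (r : Nat) : Int :=
  (2*(r:Int) + 2 - g.length) * g.getD r 0 + g.sum - 2 * (g.take (r+1)).sum

def innerA (g ps : List Int) : PySem.Dict Int Int :=
  (PySem.List.pyRange 0 (g.length : Int) 1).foldl
    (fun d i =>
      d.insert (PySem.List.pyGetD g i 0)
        ((PySem.List.pyGetD ps (-1) 0 - PySem.List.pyGetD ps i 0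
            - ((g.length : Int) - (i+1)) * PySem.List.pyGetD g i 0)
         + ((i+1) * PySem.List.pyGetD g i 0 - PySem.List.pyGetD ps i 0)))
    PySem.Dict.empty

theorem innerA_items (g ps : List Int) (hnd : g.Nodup) :
    (innerA g ps).items = (PySem.List.pyRange 0 (g.length : Int) 1).map
      (fun i => (PySem.List.pyGetD g i 0,
        (PySem.List.pyGetD ps (-1) 0 - PySem.List.pyGetD ps i 0
            - ((g.length : Int) - (i+1)) * PySem.List.pyGetD g i 0)
         + ((i+1) * PySem.List.pyGetD g i 0 - PySem.List.pyGetD ps i 0))) := by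
  have hmap : (PySem.List.pyRange 0 (g.length : Int) 1).map (fun i => PySem.List.pyGetD g i 0) = g := by
    exact PySem.List.map_pyGetD_pyRange_zero g 0
  rw [innerA, PySem.Dict.items_foldl_insert_fresh (PySem.List.pyRange 0 (g.length : Int) 1)
        (fun i => PySem.List.pyGetD g i 0)
        (fun i => (PySem.List.pyGetD ps (-1) 0 - PySem.List.pyGetD ps i 0
            - ((g.length : Int) - (i+1)) * PySem.List.pyGetD g i 0)
         + ((i+1) * PySem.List.pyGetD g i 0 - PySem.List.pyGetD ps i 0))
        PySem.Dict.empty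
        (by intro a _; exact PySem.Dict.contains_empty (ν := Int) a) (by rw [hmap]; exact hnd)]
  simp [PySem.Dict.empty]

theorem innerA_getD (g : List Int) (hnd : g.Nodup) (r : Nat) (hr : r < g.length) :
    (innerA g (preTbl g g.length)).getD (g.getD r 0) 0 = vspec g r := by
  have hkeys : (innerA g (preTbl g g.length)).keys.Nodup := by
    show ((innerA g (preTbl g g.length)).items.map (fun p => p.1)).Nodup
    rw [innerA_items g _ hnd, List.map_map]
    have : ((fun p : Int × Int => p.1) ∘ (fun i => (PySem.List.pyGetD g i 0,
        (PySem.List.pyGetD (preTbl g g.length) (-1) 0 - PySem.List.pyGetD (preTbl g g.length) i 0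
            - ((g.length : Int) - (i+1)) * PySem.List.pyGetD g i 0)
         + ((i+1) * PySem.List.pyGetD g i 0 - PySem.List.pyGetD (preTbl g g.length) i 0))))
        = (fun i => PySem.List.pyGetD g i 0) := rfl
    rw [this]
    have h2 := PySem.List.map_pyGetD_pyRange_zero g 0
    rw [show PySem.List.len g = (g.length : Int) from rfl] at h2
    rw [h2]
    exact hnd
  have hmem : (g.getD r 0,
      (PySem.List.pyGetD (preTbl g g.length) (-1) 0 - PySem.List.pyGetD (preTbl g g.length) (r : Int) 0
          - ((g.length : Int) - ((r : Int)+1)) * PySem.List.pyGetD g (r : Int) 0)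
       + (((r : Int)+1) * PySem.List.pyGetD g (r : Int) 0 - PySem.List.pyGetD (preTbl g g.length) (r : Int) 0))
      ∈ (innerA g (preTbl g g.length)).items := by
    rw [innerA_items g _ hnd]
    refine List.mem_map.mpr ⟨(r : Int), PySem.List.mem_pyRange_one.mpr ⟨by positivity, by exact_mod_cast hr⟩, ?_⟩
    rw [PySem.List.pyGetD_natCast]
  rw [PySem.Dict.getD_of_mem_items _ hmem hkeys]
  have hne : preTbl g g.length ≠ [] := by
    intro h; have := length_preTbl g g.length; rw [h] at this; simp at this; omega
  rw [pyGetD_neg_one _ _ hne, length_preTbl, PySem.List.pyGetD_natCast,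
      PySem.List.pyGetD_natCast, getD_preTbl g _ _ (by omega), getD_preTbl g _ _ hr,
      if_pos (by omega), if_pos (by omega), show g.length - 1 + 1 = g.length by omega,
      List.take_length, vspec]
  ring

def sweepStep (F : Int → Int → Int → Int → Int) :
    (List Int × Int × Int) → Int → (List Int × Int × Int) :=
  fun st x => (PySem.List.pySetD st.1 x (F (PySem.List.pyGetD st.1 x 0) st.2.1 st.2.2 x),
               st.2.1 + 1, st.2.2 + x)

theorem sweep_length (F : Int → Int → Int → Int → Int) (g : List Int) :
    ∀ (res : List Int) (c s : Int),
      (g.foldl (sweepStep F) (res, c, s)).1.length = res.length := by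
  induction g with
  | nil => intro res c s; rfl
  | cons x t ih =>
    intro res c s
    simp only [List.foldl_cons, sweepStep]
    rw [ih]
    exact PySem.List.length_pySetD res x _

theorem sweep_getD (F : Int → Int → Int → Int → Int) (g : List Int) (hnd : g.Nodup) :
    ∀ (res : List Int) (c s : Int),
      (∀ x ∈ g, 0 ≤ x ∧ x.toNat < res.length) →
      ∀ (j : Nat), j < res.length →
      (g.foldl (sweepStep F) (res, c, s)).1.getD j 0 =
        if (j : Int) ∈ g then
          F (res.getD j 0) (c + (g.idxOf (j : Int) : Int))
            (s + (g.take (g.idxOf (j : Int))).sum) (j : Int)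
        else res.getD j 0 := by
  induction g with
  | nil => intro res c s _ j hj; simp
  | cons x t ih =>
    intro res c s hrange j hj
    obtain ⟨hx0, hxlen⟩ := hrange x List.mem_cons_self
    have hxt : x ∉ t := (List.nodup_cons.mp hnd).1
    have hndt : t.Nodup := (List.nodup_cons.mp hnd).2
    have hxeq : x = ((x.toNat : Nat) : Int) := by omega
    simp only [List.foldl_cons, sweepStep]
    set v := F (PySem.List.pyGetD res x 0) c s x with hv
    have hres' : (PySem.List.pySetD res x v).length = res.length :=
      PySem.List.length_pySetD res x v
    rw [ih hndt _ _ _ (fun y hy => by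
          obtain ⟨h1, h2⟩ := hrange y (List.mem_cons_of_mem x hy); exact ⟨h1, by omega⟩)
        j (by omega)]
    have hsetD : ∀ (k : Nat), k < res.length →
        (PySem.List.pySetD res x v).getD k 0 = if k = x.toNat then v else res.getD k 0 := by
      intro k hk
      rw [PySem.List.pySetD_of_nonneg _ _ hx0,
          List.getD_eq_getElem _ _ (by rwa [List.length_set]),
          List.getElem_set, List.getD_eq_getElem _ _ hk]
      split_ifs with h1 h2 h2 <;> first | rfl | omega
    by_cases hjt : (j : Int) ∈ t
    · have hjx : (j : Int) ≠ x := fun h => hxt (h ▸ hjt)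
      rw [if_pos hjt, if_pos (List.mem_cons_of_mem x hjt), hsetD j hj, if_neg (by omega),
          List.idxOf_cons_ne t (Ne.symm hjx)]
      push_cast
      rw [List.take_succ_cons, List.sum_cons]
      ring_nf
    · by_cases hjx : (j : Int) = x
      · have hjxn : j = x.toNat := by omega
        rw [if_neg hjt, if_pos (by rw [hjx]; exact List.mem_cons_self), hsetD j hj,
            if_pos hjxn, hv, hjx, List.idxOf_cons_self]
        have : PySem.List.pyGetD res x 0 = res.getD j 0 := by
          rw [hxeq, PySem.List.pyGetD_natCast]; congr 1; omega
        rw [this]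
        norm_num
      · rw [if_neg hjt, if_neg (by simp [hjx, hjt]), hsetD j hj, if_neg (by omega)]

def F1 : Int → Int → Int → Int → Int := fun _ c s x => c * x - s
def F2 : Int → Int → Int → Int → Int := fun old c s x => old + (s - c * x)

def bstep (res g : List Int) : List Int :=
  (g.reverse.foldl (sweepStep F2) ((g.foldl (sweepStep F1) (res, 0, 0)).1, 0, 0)).1

theorem bstep_length (res g : List Int) : (bstep res g).length = res.length := by
  rw [bstep, sweep_length, sweep_length]

theorem bstep_getD (g res : List Int) (hnd : g.Nodup)
    (hrange : ∀ x ∈ g, 0 ≤ x ∧ x.toNat < res.length) (j : Nat) (hj : j < res.length) :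
    (bstep res g).getD j 0 = if (j : Int) ∈ g then vspec g (g.idxOf (j : Int)) else res.getD j 0 := by
  have hlen1 : (g.foldl (sweepStep F1) (res, 0, 0)).1.length = res.length := sweep_length _ _ _ _ _
  have hndr : g.reverse.Nodup := List.nodup_reverse.mpr hnd
  rw [bstep, sweep_getD F2 g.reverse hndr _ _ _
        (fun y hy => by
          obtain ⟨h1, h2⟩ := hrange y (List.mem_reverse.mp hy); exact ⟨h1, by omega⟩)
        j (by omega),
      sweep_getD F1 g hnd _ _ _ hrange j hj]
  by_cases hjg : (j : Int) ∈ g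
  · have hjr : (j : Int) ∈ g.reverse := List.mem_reverse.mpr hjg
    rw [if_pos hjr, if_pos hjg, if_pos hjg]
    set r := g.idxOf (j : Int) with hrdef
    have hr : r < g.length := List.idxOf_lt_length_of_mem hjg
    have hgr : g[r] = (j : Int) := List.getElem_idxOf hr
    have hr' : g.reverse.idxOf (j : Int) = g.length - 1 - r := by
      have h1 : g.length - 1 - r < g.length := by omega
      have h2 : g.reverse[g.length - 1 - r]'(by simpa using h1) = (j : Int) := by
        rw [List.getElem_reverse]
        rw [getElem_congr rfl (show g.length - 1 - (g.length - 1 - r) = r by omega) (by omega)]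
        exact hgr
      have := List.Nodup.idxOf_getElem hndr (g.length - 1 - r) (by simpa using h1)
      rw [h2] at this
      simpa using this
    have htake : (g.reverse.take (g.length - 1 - r)).sum = (g.drop (r + 1)).sum := by
      rw [List.take_reverse, List.sum_reverse,
          show g.length - (g.length - 1 - r) = r + 1 by omega]
    rw [hr', htake]
    simp only [F1, F2]
    have hsplit : (g.take (r + 1)).sum + (g.drop (r + 1)).sum = g.sum :=
      List.sum_take_add_sum_drop g (r + 1)
    have hts : (g.take (r + 1)).sum = (g.take r).sum + g.getD r 0 := take_sum_succ g r hr
    have hgetD : g.getD r 0 = (j : Int) := by rw [List.getD_eq_getElem _ _ hr, hgr]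
    rw [vspec, hgetD]
    have hcast : ((g.length - 1 - r : Nat) : Int) = (g.length : Int) - 1 - r := by omega
    rw [hgetD] at hts
    rw [hcast]
    linear_combination hsplit + hts
  · rw [if_neg (by simpa using hjg), if_neg hjg, if_neg hjg]

theorem mem_grp_self (arr : List Int) (num : Int) (j : Nat) (hj : j < arr.length) :
    ((j : Int) ∈ grp arr num) ↔ arr.getD j 0 = num := by
  rw [mem_grp, List.getD_eq_getElem _ _ hj]
  constructor
  · rintro ⟨k, hk, hjk, hnum⟩
    have : j = k := by exact_mod_cast hjk
    subst this; exact hnum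
  · intro h; exact ⟨j, hj, rfl, h⟩

theorem grp_range (arr : List Int) (num : Int) :
    ∀ x ∈ grp arr num, 0 ≤ x ∧ x.toNat < arr.length := by
  intro x hx
  obtain ⟨k, hk, rfl, _⟩ := (mem_grp arr num x).mp hx
  exact ⟨by positivity, by simpa using hk⟩

theorem outerB_length (arr : List Int) :
    ∀ (ns : List Int) (res : List Int),
      (ns.foldl (fun res num => bstep res (grp arr num)) res).length = res.length := by
  intro ns
  induction ns with
  | nil => intro res; rfl
  | cons num t ih => intro res; rw [List.foldl_cons, ih, bstep_length]

theorem outerB_getD (arr : List Int) :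
    ∀ (ns : List Int) (res : List Int), res.length = arr.length →
      ∀ j : Nat, j < arr.length →
      (ns.foldl (fun res num => bstep res (grp arr num)) res).getD j 0 =
        if arr.getD j 0 ∈ ns then
          vspec (grp arr (arr.getD j 0)) ((grp arr (arr.getD j 0)).idxOf (j : Int))
        else res.getD j 0 := by
  intro ns
  induction ns with
  | nil => intro res _ j _; simp
  | cons num t ih =>
    intro res hlen j hj
    rw [List.foldl_cons,
        ih _ (by rw [bstep_length]; exact hlen) j hj,
        bstep_getD (grp arr num) res (nodup_grp arr num)
          (fun x hx => by
            obtain ⟨h1, h2⟩ := grp_range arr num x hx; exact ⟨h1, by omega⟩)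
          j (by omega)]
    simp only [mem_grp_self arr num j hj]
    by_cases h1 : arr.getD j 0 ∈ t
    · rw [if_pos h1, if_pos (List.mem_cons_of_mem _ h1)]
    · rw [if_neg h1]
      by_cases h2 : arr.getD j 0 = num
      · rw [if_pos h2, if_pos (List.mem_cons.mpr (Or.inl h2)), ← h2]
      · rw [if_neg h2, if_neg (by rw [List.mem_cons]; push Not; exact ⟨h2, h1⟩)]

theorem write_fold_length (f : Int × Int → Int) (arr : List Int) :
    ∀ (s : Int) (res : List Int),
      ((PySem.List.enumerate arr s).foldl
        (fun res p => PySem.List.pySetD res p.1 (f p)) res).length = res.length := by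
  induction arr with
  | nil => intro s res; rfl
  | cons x t ih =>
    intro s res
    rw [PySem.List.enumerate_cons, List.foldl_cons, ih, PySem.List.length_pySetD]

theorem write_fold_getD (f : Int × Int → Int) (arr : List Int) :
    ∀ (s : Int), 0 ≤ s → ∀ (res : List Int) (j : Nat), j < res.length →
      ((PySem.List.enumerate arr s).foldl
        (fun res p => PySem.List.pySetD res p.1 (f p)) res).getD j 0 =
        if s ≤ (j : Int) ∧ (j : Int) < s + arr.length then
          f ((j : Int), arr.getD ((j : Int) - s).toNat 0)
        else res.getD j 0 := by
  induction arr with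
  | nil =>
    intro s _ res j hj
    simp only [PySem.List.enumerate_nil, List.foldl_nil, List.length_nil]
    rw [if_neg (by push_cast; omega)]
  | cons x t ih =>
    intro s hs res j hj
    rw [PySem.List.enumerate_cons, List.foldl_cons,
        ih (s+1) (by omega) _ j (by rw [PySem.List.length_pySetD]; exact hj)]
    have hset : (PySem.List.pySetD res s (f (s, x))).getD j 0 =
        if (j : Int) = s then f ((j : Int), x) else res.getD j 0 := by
      rw [PySem.List.pySetD_of_nonneg _ _ hs,
          List.getD_eq_getElem _ _ (by rwa [List.length_set]),
          List.getElem_set, List.getD_eq_getElem _ _ hj]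
      split_ifs with h1 h2 h2 <;> first | omega | rfl | (rw [show ((j:Int), x) = (s, x) by rw [h2]])
    by_cases hin : s + 1 ≤ (j : Int) ∧ (j : Int) < s + 1 + t.length
    · rw [if_pos hin, if_pos (by push_cast [List.length_cons]; omega)]
      have : ((j : Int) - s).toNat = ((j : Int) - (s+1)).toNat + 1 := by omega
      rw [this, List.getD_cons_succ]
    · rw [if_neg hin, hset]
      by_cases hjs : (j : Int) = s
      · rw [if_pos hjs, if_pos (by push_cast [List.length_cons]; omega)]
        have : ((j : Int) - s).toNat = 0 := by omega
        rw [this, List.getD_cons_zero]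
      · rw [if_neg hjs, if_neg (by push_cast [List.length_cons] at hin ⊢; omega)]

theorem mkLookup_items (arr : List Int) :
    (mkLookup arr).items = (PySem.Set.ofList arr).map (fun num => (num, grp arr num)) := by
  rw [PySem.Dict.items_eq_map_keys _ (mkLookup_nodup arr) [], mkLookup_keys]
  exact List.map_congr_left (fun num _ => by rw [mkLookup_getD])

def psRaw (g : List Int) : List Int :=
  (PySem.List.pyRange 1 (g.length : Int) 1).foldl
    (fun ps i => PySem.List.pySetD ps i (PySem.List.pyGetD ps i 0 + PySem.List.pyGetD ps (i-1) 0)) g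

def ivsA (arr : List Int) : PySem.Dict Int (PySem.Dict Int Int) :=
  (mkLookup arr).items.foldl (fun acc p => acc.insert p.1 (innerA p.2 (psRaw p.2))) PySem.Dict.empty

theorem hA_shape (arr : List Int) :
    getDistances arr = (PySem.List.enumerate arr 0).foldl
      (fun res p => PySem.List.pySetD res p.1 (((ivsA arr).getD p.2 PySem.Dict.empty).getD p.1 0))
      (List.replicate arr.length (-1 : Int)) := rfl

theorem hB_shape (arr : List Int) :
    getDistances_alt arr = (mkLookup arr).values.foldl bstep (List.replicate arr.length (0 : Int)) := rfl

theorem ivsA_items (arr : List Int) :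
    (ivsA arr).items = (PySem.Set.ofList arr).map
      (fun num => (num, innerA (grp arr num) (psRaw (grp arr num)))) := by
  rw [ivsA, mkLookup_items, List.foldl_map,
      PySem.Dict.items_foldl_insert_fresh (PySem.Set.ofList arr)
        (fun num => num)
        (fun num => innerA (grp arr num) (psRaw (grp arr num)))
        PySem.Dict.empty
        (by intro a _; exact PySem.Dict.contains_empty (ν := PySem.Dict Int Int) a)
        (by simp [PySem.Set.nodup_ofList arr])]
  simp [PySem.Dict.empty]

theorem ivsA_getD (arr : List Int) (num : Int) (hmem : num ∈ arr) :
    (ivsA arr).getD num PySem.Dict.empty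
      = innerA (grp arr num) (preTbl (grp arr num) (grp arr num).length) := by
  have hkeys : (ivsA arr).keys.Nodup := by
    show ((ivsA arr).items.map (fun p => p.1)).Nodup
    rw [ivsA_items, List.map_map]
    rw [show ((fun p : Int × PySem.Dict Int Int => p.1) ∘
          fun num => (num, innerA (grp arr num) (psRaw (grp arr num)))) = id from rfl,
        List.map_id]
    exact PySem.Set.nodup_ofList arr
  have hmem' : (num, innerA (grp arr num) (psRaw (grp arr num))) ∈ (ivsA arr).items := by
    rw [ivsA_items]
    exact List.mem_map.mpr ⟨num, (PySem.Set.mem_ofList arr num).mpr hmem, rfl⟩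
  rw [PySem.Dict.getD_of_mem_items _ hmem' hkeys, psRaw,
      prefix_fold_aux (grp arr num) (grp arr num).length le_rfl]

theorem A_getD (arr : List Int) (j : Nat) (hj : j < arr.length) :
    (getDistances arr).getD j 0 =
      vspec (grp arr (arr.getD j 0)) ((grp arr (arr.getD j 0)).idxOf (j : Int)) := by
  rw [hA_shape,
      write_fold_getD _ arr 0 le_rfl _ j (by simpa using hj),
      if_pos ⟨by positivity, by omega⟩]
  have h0 : ((j : Int) - 0).toNat = j := by omega
  rw [h0]
  set num := arr.getD j 0 with hnum
  set g := grp arr num with hg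
  have hjg : (j : Int) ∈ g := (mem_grp_self arr num j hj).mpr rfl
  set r := g.idxOf (j : Int) with hrdef
  have hr : r < g.length := List.idxOf_lt_length_of_mem hjg
  have hgetD : g.getD r 0 = (j : Int) := by
    rw [List.getD_eq_getElem _ _ hr]
    exact List.getElem_idxOf hr
  rw [ivsA_getD arr num (by rw [hnum, List.getD_eq_getElem _ _ hj]; exact List.getElem_mem hj),
      ← hgetD, innerA_getD g (nodup_grp arr num) r hr]

theorem B_getD (arr : List Int) (j : Nat) (hj : j < arr.length) :
    (getDistances_alt arr).getD j 0 =
      vspec (grp arr (arr.getD j 0)) ((grp arr (arr.getD j 0)).idxOf (j : Int)) := by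
  have hvals : (mkLookup arr).values = (PySem.Set.ofList arr).map (fun num => grp arr num) := by
    show (mkLookup arr).items.map (fun p => p.2) = _
    rw [mkLookup_items, List.map_map]
    rfl
  rw [hB_shape, hvals, List.foldl_map,
      outerB_getD arr (PySem.Set.ofList arr) _ (by simp) j hj,
      if_pos ((PySem.Set.mem_ofList arr _).mpr
        (by rw [List.getD_eq_getElem _ _ hj]; exact List.getElem_mem hj))]

theorem A_length (arr : List Int) : (getDistances arr).length = arr.length := by
  rw [hA_shape, write_fold_length, List.length_replicate]

theorem B_length (arr : List Int) : (getDistances_alt arr).length = arr.length := by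
  rw [hB_shape]
  have hvals : (mkLookup arr).values = (PySem.Set.ofList arr).map (fun num => grp arr num) := by
    show (mkLookup arr).items.map (fun p => p.2) = _
    rw [mkLookup_items, List.map_map]
    rfl
  rw [hvals, List.foldl_map, outerB_length, List.length_replicate]

theorem AB_eq (arr : List Int) : getDistances arr = getDistances_alt arr := by
  apply List.ext_getElem (by rw [A_length, B_length])
  intro j h1 h2
  rw [← List.getD_eq_getElem (getDistances arr) 0 h1,
      ← List.getD_eq_getElem (getDistances_alt arr) 0 h2,
      A_getD arr j (by rwa [A_length] at h1), B_getD arr j (by rwa [A_length] at h1)]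

-- ===== VERDICT (by name: the statement is the Claim_ definition above) =====
theorem getDistances_spec : Claim_equal_getDistances := by
  intro arr _
  exact AB_eq arr
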